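-- pv_equiv track=rewrite | github.com/AdamZhouSE/pythonHomework | Code/CodeRecords/2945/60810/300318.py | girl
-- ===== SOURCE A (Python) =====
-- def girl(str):
--     res = 0
--     for i in range(len(str)-3):
--         if (str[i:i + 4] == "girl"):
--             res += 1
--     str=str.replace("girl","nnnn")
--     for i in range(len(str)-1):
--         if (str[i:i + 2] == "ir"):
--             res += 1
--     str=str.replace("ir","nn")
--     for i in range(len(str)):
--         if (str[i] == 'g' or str[i] == 'i' or str[i] == 'r' or str[i]=='l'):
--             res += 1
--     return res
-- ===== SOURCE B (Python) =====
-- def girl(str):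
--     # single greedy left-to-right scan, priority girl > ir > single letter
--     res = 0
--     i = 0
--     n = len(str)
--     while i < n:
--         if str[i:i+4] == "girl":
--             res += 1
--             i += 4
--         elif str[i:i+2] == "ir":
--             res += 1
--             i += 2
--         else:
--             if str[i] in "girl":
--                 res += 1
--             i += 1
--     return res
-- ===== Notes on version B (the rewrite author's own statement) =====
-- stated objective: alternative
-- what changed: Replaces A's three sliding-window counting passes interleaved with two global string replacements by a single left-to-right greedy scan with priority girl > ir > single letter, never building intermediate strings.
import Mathlib
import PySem

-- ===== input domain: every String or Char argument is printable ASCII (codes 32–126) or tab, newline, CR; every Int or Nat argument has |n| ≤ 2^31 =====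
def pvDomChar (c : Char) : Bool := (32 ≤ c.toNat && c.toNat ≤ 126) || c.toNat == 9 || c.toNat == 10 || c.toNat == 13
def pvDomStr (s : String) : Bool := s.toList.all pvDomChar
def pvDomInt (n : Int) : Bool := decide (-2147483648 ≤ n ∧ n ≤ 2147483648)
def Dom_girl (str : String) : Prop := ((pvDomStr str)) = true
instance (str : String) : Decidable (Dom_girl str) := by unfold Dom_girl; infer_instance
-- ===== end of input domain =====

-- B replaces A's three counting passes plus two global replacements by one greedy
-- left-to-right scan (priority girl > ir > single letter), building no intermediate strings.

-- ===== PORT A =====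
-- literal port of A; character-list literals stand for the string literals "girl", "nnnn", "ir", "nn"
def girl (str : String) : Int :=
  let s := str.toList
  let res : Int :=
    (PySem.List.pyRange 0 ((s.length : Int) - 3) 1).foldl
      (fun res i =>
        if PySem.Chars.slice s (some i) (some (i + 4)) == ['g','i','r','l'] then res + 1 else res) 0
  let s := PySem.Chars.replace s ['g','i','r','l'] ['n','n','n','n']
  let res :=
    (PySem.List.pyRange 0 ((s.length : Int) - 1) 1).foldl
      (fun res i =>
        if PySem.Chars.slice s (some i) (some (i + 2)) == ['i','r'] then res + 1 else res) res
  let s := PySem.Chars.replace s ['i','r'] ['n','n']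
  let res :=
    (PySem.List.pyRange 0 (s.length : Int) 1).foldl
      (fun res i =>
        if PySem.List.pyGetD s i ' ' == 'g' || PySem.List.pyGetD s i ' ' == 'i'
            || PySem.List.pyGetD s i ' ' == 'r' || PySem.List.pyGetD s i ' ' == 'l'
        then res + 1 else res) res
  res

-- ===== PORT B =====
-- the while loop of Source B as recursion on the unscanned suffix (i += k ↔ dropping k chars)
def girlAltGo : List Char → Int
  | [] => 0
  | c :: t =>
    if (c :: t).take 4 == ['g','i','r','l'] then 1 + girlAltGo (t.drop 3)
    else if (c :: t).take 2 == ['i','r'] then 1 + girlAltGo (t.drop 1)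
    else (if c == 'g' || c == 'i' || c == 'r' || c == 'l' then 1 else 0) + girlAltGo t
termination_by l => l.length

def girl_alt (str : String) : Int := girlAltGo str.toList

-- ===== PRECONDITION & SPEC =====
def Spec_girl (str : String) (out : Int) : Prop := out = girl_alt str
instance (str : String) (out : Int) : Decidable (Spec_girl str out) := by unfold Spec_girl; infer_instance

-- ===== CLAIM (what is proved, stated in full; the proofs are below) =====
def Claim_equal_girl : Prop := ∀ (str : String), Dom_girl str → Spec_girl str (girl str)

-- ===== LEMMAS AND PROOFS =====

-- number of (possibly overlapping) occurrences of pat as a window, i.e. A's sliding-window count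
def occ (pat : List Char) : List Char → Nat
  | [] => 0
  | c :: t => (if pat.isPrefixOf (c :: t) then 1 else 0) + occ pat t

-- Python's str.replace for a nonempty pattern c0 :: old', fuel-free
def rep (c0 : Char) (old' new : List Char) : List Char → List Char
  | [] => []
  | c :: t =>
    if (c0 :: old').isPrefixOf (c :: t) then new ++ rep c0 old' new (t.drop old'.length)
    else c :: rep c0 old' new t
termination_by l => l.length

theorem rep_eq_go (c0 : Char) (old' new : List Char) :
    ∀ (fuel : Nat) (l acc : List Char), l.length ≤ fuel →
      PySem.Chars.replace.go (c0 :: old') new fuel l acc = acc.reverse ++ rep c0 old' new l := by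
  intro fuel
  induction fuel with
  | zero =>
    intro l acc h
    have hl : l = [] := List.eq_nil_of_length_eq_zero (Nat.le_zero.mp h)
    subst hl
    rw [PySem.Chars.replace.go.eq_def]
    simp [rep]
  | succ n ih =>
    intro l acc h
    cases l with
    | nil =>
      rw [PySem.Chars.replace.go.eq_def]
      simp [rep]
    | cons c t =>
      rw [PySem.Chars.replace.go.eq_def]
      simp only []
      by_cases hp : (c0 :: old').isPrefixOf (c :: t)
      · rw [if_pos hp]
        have hd : List.drop (c0 :: old').length (c :: t) = t.drop old'.length := by
          simp
        have hb : (t.drop old'.length).length ≤ n := by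
          simp only [List.length_drop]
          simp only [List.length_cons] at h
          omega
        rw [hd, ih _ _ hb]
        rw [rep, if_pos hp]
        simp
      · rw [if_neg hp]
        rw [ih _ _ (Nat.le_of_succ_le_succ h)]
        rw [rep, if_neg hp]
        simp

theorem replace_eq_rep (c0 : Char) (old' new s : List Char) :
    PySem.Chars.replace s (c0 :: old') new = rep c0 old' new s := by
  rw [PySem.Chars.replace]
  simp only [List.isEmpty_cons, Bool.false_eq_true, if_false]
  rw [rep_eq_go c0 old' new s.length s [] (le_refl _)]
  simp


theorem occ_eq_countP_full (pat : List Char) : ∀ s : List Char,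
    occ pat s = (List.range s.length).countP (fun k => pat.isPrefixOf (s.drop k)) := by
  intro s
  induction s with
  | nil => simp [occ]
  | cons c t ih =>
    rw [occ, List.length_cons, List.range_succ_eq_map]
    rw [List.countP_cons, List.countP_map]
    simp only [Function.comp_def, List.drop_succ_cons, List.drop_zero]
    rw [ih]
    by_cases hp : pat.isPrefixOf (c :: t) <;> simp [hp, Nat.add_comm]

theorem countP_range_restrict (pat : List Char) (s : List Char) (m : Nat)
    (hm : m ≤ s.length) (h : s.length < m + pat.length) :
    (List.range s.length).countP (fun k => pat.isPrefixOf (s.drop k)) =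
      (List.range m).countP (fun k => pat.isPrefixOf (s.drop k)) := by
  rw [show s.length = m + (s.length - m) from by omega]
  rw [List.range_add, List.countP_append]
  have hz : ((List.range (s.length - m)).map (fun x => m + x)).countP
      (fun k => pat.isPrefixOf (s.drop k)) = 0 := by
    rw [List.countP_eq_zero]
    intro a ha
    simp only [List.mem_map, List.mem_range] at ha
    obtain ⟨k, hk, rfl⟩ := ha
    intro hpre
    have hle := (List.isPrefixOf_iff_prefix.mp hpre).length_le
    simp only [List.length_drop] at hle
    omega
  simp [hz]

theorem countP_range_getD (p : Char → Bool) : ∀ s : List Char,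
    (List.range s.length).countP (fun k => p (s.getD k ' ')) = s.countP p := by
  intro s
  induction s with
  | nil => simp
  | cons c t ih =>
    rw [List.length_cons, List.range_succ_eq_map]
    rw [List.countP_cons, List.countP_map, List.countP_cons]
    simp only [Function.comp_def, List.getD_cons_succ, List.getD_cons_zero]
    rw [ih]

theorem countP_window (s pat : List Char) (w : Int) (hw : w = pat.length) (m : Nat)
    (hm : m ≤ s.length) (hm2 : s.length < m + pat.length) :
    List.countP (fun k : Nat => PySem.Chars.slice s (some (0 + (k : Int))) (some (0 + (k : Int) + w)) == pat)
      (List.range m) = occ pat s := by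
  rw [occ_eq_countP_full, countP_range_restrict pat s m hm hm2]
  apply List.countP_congr
  intro k _
  simp only [zero_add]
  have hcast : (k : Int) + w = ((k + pat.length : Nat) : Int) := by rw [hw]; push_cast; ring
  rw [hcast, PySem.Chars.slice_eq_listSlice, PySem.List.slice_natCast, Nat.add_sub_cancel_left]
  rw [Bool.eq_iff_iff]
  rw [beq_iff_eq, List.isPrefixOf_iff_prefix, List.prefix_iff_eq_take]
  simp [eq_comm]

theorem girl_eq_sum (str : String) :
    girl str =
      (occ ['g','i','r','l'] str.toList : Int)
      + occ ['i','r'] (rep 'g' ['i','r','l'] ['n','n','n','n'] str.toList)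
      + (((rep 'i' ['r'] ['n','n'] (rep 'g' ['i','r','l'] ['n','n','n','n'] str.toList)).countP
            (fun c => c == 'g' || c == 'i' || c == 'r' || c == 'l') : Nat) : Int) := by
  simp only [girl, replace_eq_rep]
  rw [PySem.List.pyRange_one, PySem.List.pyRange_one, PySem.List.pyRange_one]
  rw [PySem.List.foldl_if_add_one, PySem.List.foldl_if_add_one, PySem.List.foldl_if_add_one]
  rw [List.countP_map, List.countP_map, List.countP_map]
  simp only [Function.comp_def]
  rw [countP_window str.toList ['g','i','r','l'] 4 (by norm_num) _ (by omega) (by simp; omega)]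
  rw [countP_window (rep 'g' ['i','r','l'] ['n','n','n','n'] str.toList) ['i','r'] 2 (by norm_num) _
        (by omega) (by simp; omega)]
  have h3 : ∀ t : List Char,
      List.countP (fun k : Nat =>
          PySem.List.pyGetD t (0 + (k : Int)) ' ' == 'g' || PySem.List.pyGetD t (0 + (k : Int)) ' ' == 'i'
            || PySem.List.pyGetD t (0 + (k : Int)) ' ' == 'r' || PySem.List.pyGetD t (0 + (k : Int)) ' ' == 'l')
        (List.range ((t.length : Int) - 0).toNat)
        = t.countP (fun c => c == 'g' || c == 'i' || c == 'r' || c == 'l') := by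
    intro t
    have hr : ((t.length : Int) - 0).toNat = t.length := by omega
    rw [hr, ← countP_range_getD (fun c => c == 'g' || c == 'i' || c == 'r' || c == 'l') t]
    apply List.countP_congr
    intro k _
    simp
  rw [h3]
  omega

theorem occ_cons_ne (p0 : Char) (pr : List Char) (c : Char) (x : List Char) (h : c ≠ p0) :
    occ (p0 :: pr) (c :: x) = occ (p0 :: pr) x := by
  have hb : ¬ ((p0 :: pr).isPrefixOf (c :: x) = true) := by
    simp only [List.isPrefixOf_iff_prefix, List.cons_prefix_cons]
    intro hcon
    exact h hcon.1.symm
  rw [occ, if_neg hb, Nat.zero_add]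

theorem occ_cons_pos (pat : List Char) (c : Char) (x : List Char) (h : pat.isPrefixOf (c :: x)) :
    occ pat (c :: x) = 1 + occ pat x := by
  rw [occ, if_pos h]

theorem repI_cons_n (y : List Char) :
    rep 'i' ['r'] ['n','n'] ('n' :: y) = 'n' :: rep 'i' ['r'] ['n','n'] y := by
  rw [rep, if_neg]
  simp [List.isPrefixOf]

theorem rep_head_r (t : List Char) (h : ¬ (['r'] <+: t)) :
    ¬ (['r'] <+: rep 'g' ['i','r','l'] ['n','n','n','n'] t) := by
  cases t with
  | nil =>
    rw [rep]
    simp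
  | cons d u =>
    by_cases hp : (['g','i','r','l'] : List Char).isPrefixOf (d :: u)
    · rw [rep, if_pos hp]
      simp [List.cons_prefix_cons]
    · rw [rep, if_neg hp]
      intro hc
      apply h
      simp only [List.cons_prefix_cons, List.nil_prefix, and_true] at hc ⊢
      exact hc

theorem main_sum_eq_go (s : List Char) :
    (occ ['g','i','r','l'] s : Int)
      + occ ['i','r'] (rep 'g' ['i','r','l'] ['n','n','n','n'] s)
      + (((rep 'i' ['r'] ['n','n'] (rep 'g' ['i','r','l'] ['n','n','n','n'] s)).countP
            (fun c => c == 'g' || c == 'i' || c == 'r' || c == 'l') : Nat) : Int)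
      = girlAltGo s := by
  induction s using girlAltGo.induct with
  | case1 => simp [occ, rep, girlAltGo]
  | case2 c t h ih =>
    have hpre : ['g','i','r','l'] <+: (c :: t) := by
      rw [List.prefix_iff_eq_take]
      exact (beq_iff_eq.mp h).symm
    obtain ⟨u, hu⟩ := hpre
    simp only [List.cons_append, List.nil_append, List.cons.injEq] at hu
    obtain ⟨rfl, rfl⟩ := hu
    rw [girlAltGo, if_pos h]
    simp only [List.drop_succ_cons, List.drop_zero] at ih ⊢
    have hp4 : (['g','i','r','l'] : List Char).isPrefixOf ('g'::'i'::'r'::'l'::u) := by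
      simp [List.isPrefixOf]
    have e1 : occ ['g','i','r','l'] ('g'::'i'::'r'::'l'::u) = 1 + occ ['g','i','r','l'] u := by
      rw [occ_cons_pos _ _ _ hp4, occ_cons_ne _ _ _ _ (by decide),
        occ_cons_ne _ _ _ _ (by decide), occ_cons_ne _ _ _ _ (by decide)]
    have e2 : rep 'g' ['i','r','l'] ['n','n','n','n'] ('g'::'i'::'r'::'l'::u)
        = 'n'::'n'::'n'::'n':: rep 'g' ['i','r','l'] ['n','n','n','n'] u := by
      rw [rep, if_pos hp4]
      simp
    have e3 : occ ['i','r'] ('n'::'n'::'n'::'n':: rep 'g' ['i','r','l'] ['n','n','n','n'] u)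
        = occ ['i','r'] (rep 'g' ['i','r','l'] ['n','n','n','n'] u) := by
      rw [occ_cons_ne _ _ _ _ (by decide), occ_cons_ne _ _ _ _ (by decide),
        occ_cons_ne _ _ _ _ (by decide), occ_cons_ne _ _ _ _ (by decide)]
    rw [e1, e2, e3, repI_cons_n, repI_cons_n, repI_cons_n, repI_cons_n]
    simp only [List.countP_cons]
    norm_num
    omega
  | case3 c t h1 h2 ih =>
    have hpre : ['i','r'] <+: (c :: t) := by
      rw [List.prefix_iff_eq_take]
      exact (beq_iff_eq.mp h2).symm
    obtain ⟨u, hu⟩ := hpre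
    simp only [List.cons_append, List.nil_append, List.cons.injEq] at hu
    obtain ⟨rfl, rfl⟩ := hu
    rw [girlAltGo, if_neg h1, if_pos h2]
    simp only [List.drop_succ_cons, List.drop_zero] at ih ⊢
    have hp2 : (['i','r'] : List Char).isPrefixOf ('i'::'r'::u) := by
      simp [List.isPrefixOf]
    have e1 : occ ['g','i','r','l'] ('i'::'r'::u) = occ ['g','i','r','l'] u := by
      rw [occ_cons_ne _ _ _ _ (by decide), occ_cons_ne _ _ _ _ (by decide)]
    have e2 : rep 'g' ['i','r','l'] ['n','n','n','n'] ('i'::'r'::u)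
        = 'i'::'r':: rep 'g' ['i','r','l'] ['n','n','n','n'] u := by
      rw [rep, if_neg (by simp [List.isPrefixOf]), rep, if_neg (by simp [List.isPrefixOf])]
    have e3 : occ ['i','r'] ('i'::'r':: rep 'g' ['i','r','l'] ['n','n','n','n'] u)
        = 1 + occ ['i','r'] (rep 'g' ['i','r','l'] ['n','n','n','n'] u) := by
      rw [occ_cons_pos _ _ _ (by simp [List.isPrefixOf]), occ_cons_ne _ _ _ _ (by decide)]
    have e4 : rep 'i' ['r'] ['n','n'] ('i'::'r':: rep 'g' ['i','r','l'] ['n','n','n','n'] u)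
        = 'n'::'n':: rep 'i' ['r'] ['n','n'] (rep 'g' ['i','r','l'] ['n','n','n','n'] u) := by
      rw [rep, if_pos (by simp [List.isPrefixOf])]
      simp
    rw [e1, e2, e3, e4]
    simp only [List.countP_cons]
    norm_num
    omega
  | case4 c t h1 h2 ih =>
    have hbg : ¬ ((['g','i','r','l'] : List Char).isPrefixOf (c :: t) = true) := by
      intro hp
      apply h1
      rw [beq_iff_eq]
      exact (List.prefix_iff_eq_take.mp (List.isPrefixOf_iff_prefix.mp hp)).symm
    have hbi : ¬ ((['i','r'] : List Char).isPrefixOf (c :: t) = true) := by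
      intro hp
      apply h2
      rw [beq_iff_eq]
      exact (List.prefix_iff_eq_take.mp (List.isPrefixOf_iff_prefix.mp hp)).symm
    have e1 : occ ['g','i','r','l'] (c :: t) = occ ['g','i','r','l'] t := by
      rw [occ, if_neg hbg, Nat.zero_add]
    have e2 : rep 'g' ['i','r','l'] ['n','n','n','n'] (c :: t)
        = c :: rep 'g' ['i','r','l'] ['n','n','n','n'] t := by
      rw [rep, if_neg hbg]
    have hnir : ¬ ((['i','r'] : List Char).isPrefixOf
        (c :: rep 'g' ['i','r','l'] ['n','n','n','n'] t) = true) := by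
      rw [List.isPrefixOf_iff_prefix, List.cons_prefix_cons]
      rintro ⟨hci, hr⟩
      have hrt : ['r'] <+: t := by
        by_contra hnt
        exact (rep_head_r t hnt) hr
      apply hbi
      rw [List.isPrefixOf_iff_prefix, List.cons_prefix_cons]
      refine ⟨hci, ?_⟩
      simpa using hrt
    have e3 : occ ['i','r'] (c :: rep 'g' ['i','r','l'] ['n','n','n','n'] t)
        = occ ['i','r'] (rep 'g' ['i','r','l'] ['n','n','n','n'] t) := by
      rw [occ, if_neg hnir, Nat.zero_add]
    have e4 : rep 'i' ['r'] ['n','n'] (c :: rep 'g' ['i','r','l'] ['n','n','n','n'] t)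
        = c :: rep 'i' ['r'] ['n','n'] (rep 'g' ['i','r','l'] ['n','n','n','n'] t) := by
      rw [rep, if_neg hnir]
    rw [girlAltGo, if_neg h1, if_neg h2, e1, e2, e3, e4]
    simp only [List.countP_cons]
    push_cast
    omega

-- ===== VERDICT (by name: the statement is the Claim_ definition above) =====
theorem girl_spec : Claim_equal_girl := by
  intro str _
  unfold Spec_girl girl_alt
  rw [girl_eq_sum, main_sum_eq_go]
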